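-- pv_equiv track=rewrite | github.com/wu-lichao/LLM_Review_Tracer | pipeline.py | strip_channel1
-- ===== SOURCE A (Python) =====
-- def strip_channel1(raw_text: str) -> str:
--     """
--     Simulate the attacker's 'find and remove the style guide block' step.
--     Removes any line containing the recognisable Ch1 header/keywords.
--     ZWC characters are NOT touched — they're invisible and scattered.
--     """
--     lines = raw_text.splitlines()
--     keep  = []
--     skip_zone = False
--     for line in lines:
--         if "Note to Reviewers" in line or "Review terms:" in line:
--             skip_zone = True
--         if skip_zone and line.strip() == "":
--             skip_zone = False
--             continue
--         if not skip_zone: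
--             keep.append(line)
--     return "\n".join(keep)
-- ===== SOURCE B (Python) =====
-- def strip_channel1(raw_text: str) -> str:
--     """Index walk: a header line opens a skip span ending at the first blank line (inclusive)."""
--     lines = raw_text.splitlines()
--     n = len(lines)
--     keep = []
--     i = 0
--     while i < n:
--         line = lines[i]
--         if "Note to Reviewers" in line or "Review terms:" in line:
--             i += 1
--             while i < n and lines[i].strip() != "":
--                 i += 1
--             if i < n:
--                 i += 1
--         else:
--             keep.append(line)
--             i += 1
--     return "\n".join(keep)
-- ===== Notes on version B (the rewrite author's own statement) =====
-- stated objective: alternative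
-- what changed: Replaced A's persistent skip_zone boolean carried across one flag-driven loop with an explicit index walk: a header line triggers a nested inner scan that advances past the span up to and including its terminating blank line, so no state crosses iterations.
import Mathlib
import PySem

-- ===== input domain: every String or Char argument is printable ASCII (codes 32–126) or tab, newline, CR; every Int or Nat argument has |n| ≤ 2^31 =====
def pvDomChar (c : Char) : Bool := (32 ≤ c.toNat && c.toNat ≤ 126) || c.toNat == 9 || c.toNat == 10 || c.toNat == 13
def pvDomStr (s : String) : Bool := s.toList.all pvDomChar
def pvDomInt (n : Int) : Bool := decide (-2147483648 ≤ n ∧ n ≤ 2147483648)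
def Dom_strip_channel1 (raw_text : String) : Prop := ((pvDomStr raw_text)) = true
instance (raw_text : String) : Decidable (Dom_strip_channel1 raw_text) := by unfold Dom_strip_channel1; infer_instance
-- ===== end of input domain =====

-- B rewrites A's persistent skip_zone flag as an index walk with an inner skip scan; objective: alternative decomposition, same O(n) cost.

-- ===== PORT A =====
-- A's loop body, one step of the fold carrying (keep, skip_zone)
def stripAStep (acc : List String × Bool) (line : String) : List String × Bool :=
  let keep := acc.1
  let skip_zone := acc.2
  let skip_zone :=
    if PySem.Str.isIn "Note to Reviewers" line || PySem.Str.isIn "Review terms:" line then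
      true
    else skip_zone
  if skip_zone && (PySem.Str.strip line == "") then (keep, false)
  else if !skip_zone then (keep ++ [line], skip_zone)
  else (keep, skip_zone)

def strip_channel1 (raw_text : String) : String :=
  let lines := PySem.Str.splitlines raw_text
  let st := lines.foldl stripAStep ([], false)
  PySem.Str.join "\n" st.1
-- ===== PORT B =====
-- inner while of Source B: advance past non-blank lines, then skip the blank line that ends the span
def stripAltSkip : List String → List String
  | [] => []
  | l :: ls => if PySem.Str.strip l == "" then ls else stripAltSkip ls

theorem stripAltSkip_length_le (ls : List String) : (stripAltSkip ls).length ≤ ls.length := by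
  induction ls with
  | nil => simp [stripAltSkip]
  | cons l ls ih =>
    simp only [stripAltSkip]
    split
    · simp
    · exact Nat.le_trans ih (Nat.le_succ _)

-- outer walk of Source B: a header line triggers the inner skip, otherwise the line is kept
def stripAltGo : List String → List String
  | [] => []
  | l :: ls =>
    if PySem.Str.isIn "Note to Reviewers" l || PySem.Str.isIn "Review terms:" l then
      stripAltGo (stripAltSkip ls)
    else l :: stripAltGo ls
termination_by ls => ls.length
decreasing_by
  · exact Nat.lt_succ_of_le (stripAltSkip_length_le ls)
  · exact Nat.lt_succ_of_le (Nat.le_refl _)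

def strip_channel1_alt (raw_text : String) : String :=
  PySem.Str.join "\n" (stripAltGo (PySem.Str.splitlines raw_text))

-- ===== PRECONDITION & SPEC =====
def Spec_strip_channel1 (raw_text : String) (out : String) : Prop := out = strip_channel1_alt raw_text
instance (raw_text : String) (out : String) : Decidable (Spec_strip_channel1 raw_text out) := by unfold Spec_strip_channel1; infer_instance

-- ===== CLAIM (what is proved, stated in full; the proofs are below) =====
def Claim_equal_strip_channel1 : Prop := ∀ (raw_text : String), Dom_strip_channel1 raw_text → Spec_strip_channel1 raw_text (strip_channel1 raw_text)

-- ===== LEMMAS AND PROOFS =====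

-- accumulator-free rendering of A's loop body, for the proof only
def stripAGo : Bool → List String → List String
  | _, [] => []
  | skip, l :: ls =>
    if (if PySem.Str.isIn "Note to Reviewers" l || PySem.Str.isIn "Review terms:" l then true else skip)
        && (PySem.Str.strip l == "") then stripAGo false ls
    else if !(if PySem.Str.isIn "Note to Reviewers" l || PySem.Str.isIn "Review terms:" l then true else skip) then
      l :: stripAGo (if PySem.Str.isIn "Note to Reviewers" l || PySem.Str.isIn "Review terms:" l then true else skip) ls
    else stripAGo (if PySem.Str.isIn "Note to Reviewers" l || PySem.Str.isIn "Review terms:" l then true else skip) ls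

-- a line containing a header keyword has a non-whitespace character, so it never strips to ""
theorem header_not_blank (l : String)
    (h : (PySem.Str.isIn "Note to Reviewers" l || PySem.Str.isIn "Review terms:" l) = true) :
    (PySem.Str.strip l == "") = false := by
  rcases Bool.or_eq_true_iff.mp h with h' | h' <;>
  · rw [PySem.Str.isIn_iff_infix] at h'
    have hmem : ∃ c ∈ l.toList, PySem.Chars.isspace c = false := by
      refine ⟨'e', h'.mem (by decide), by decide⟩
    rcases hmem with ⟨c, hc, hcs⟩
    apply Bool.eq_false_iff.mpr
    intro hb
    have hb' : PySem.Chars.strip l.toList = ([] : List Char) := by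
      have := String.ext_iff.mp (beq_iff_eq.mp hb)
      simpa [PySem.Str.strip, PySem.Chars.strip] using this
    have hall : ∀ x ∈ l.toList, PySem.Chars.isspace x = true := by
      intro x hx
      have h1 : PySem.Chars.lstrip l.toList = List.dropWhile PySem.Chars.isspace l.toList := rfl
      have h2 : PySem.Chars.strip l.toList =
          (List.dropWhile PySem.Chars.isspace (PySem.Chars.lstrip l.toList).reverse).reverse := rfl
      rw [h2] at hb'
      have h3 : List.dropWhile PySem.Chars.isspace (PySem.Chars.lstrip l.toList).reverse = [] := by
        simpa using hb'
      have h4 : ∀ x ∈ (PySem.Chars.lstrip l.toList).reverse, PySem.Chars.isspace x := by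
        rw [← List.dropWhile_eq_nil_iff]; exact h3
      have h5 : ∀ x ∈ List.dropWhile PySem.Chars.isspace l.toList, PySem.Chars.isspace x := by
        intro x hx; exact h4 x (List.mem_reverse.mpr (h1 ▸ hx))
      have := List.takeWhile_append_dropWhile (p := PySem.Chars.isspace) (l := l.toList)
      rcases List.mem_append.mp (by rw [this]; exact hx) with h6 | h6
      · exact List.mem_takeWhile_imp h6
      · exact h5 x h6
    rw [hall c hc] at hcs; exact Bool.true_eq_false.mp hcs

-- one-step characterisations of A's loop body and of the accumulator-free loop
theorem stripAStep_header (keep : List String) (skip : Bool) (l : String)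
    (hh : (PySem.Str.isIn "Note to Reviewers" l || PySem.Str.isIn "Review terms:" l) = true) :
    stripAStep (keep, skip) l = (keep, true) := by
  have hb := header_not_blank l hh
  show (if (if PySem.Str.isIn "Note to Reviewers" l || PySem.Str.isIn "Review terms:" l then true else skip)
        && (PySem.Str.strip l == "") then (keep, false)
      else if !(if PySem.Str.isIn "Note to Reviewers" l || PySem.Str.isIn "Review terms:" l then true else skip) then
        (keep ++ [l], (if PySem.Str.isIn "Note to Reviewers" l || PySem.Str.isIn "Review terms:" l then true else skip))
      else (keep, (if PySem.Str.isIn "Note to Reviewers" l || PySem.Str.isIn "Review terms:" l then true else skip)))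
      = (keep, true)
  rw [if_pos hh, hb]
  rfl

theorem stripAStep_plain (keep : List String) (skip : Bool) (l : String)
    (hh : (PySem.Str.isIn "Note to Reviewers" l || PySem.Str.isIn "Review terms:" l) = false) :
    stripAStep (keep, skip) l =
      if skip && (PySem.Str.strip l == "") then (keep, false)
      else if !skip then (keep ++ [l], skip) else (keep, skip) := by
  show (if (if PySem.Str.isIn "Note to Reviewers" l || PySem.Str.isIn "Review terms:" l then true else skip)
        && (PySem.Str.strip l == "") then (keep, false)
      else if !(if PySem.Str.isIn "Note to Reviewers" l || PySem.Str.isIn "Review terms:" l then true else skip) then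
        (keep ++ [l], (if PySem.Str.isIn "Note to Reviewers" l || PySem.Str.isIn "Review terms:" l then true else skip))
      else (keep, (if PySem.Str.isIn "Note to Reviewers" l || PySem.Str.isIn "Review terms:" l then true else skip)))
      = _
  simp only [hh, Bool.false_eq_true, if_false]

theorem stripAGo_header (skip : Bool) (l : String) (ls : List String)
    (hh : (PySem.Str.isIn "Note to Reviewers" l || PySem.Str.isIn "Review terms:" l) = true) :
    stripAGo skip (l :: ls) = stripAGo true ls := by
  have hb := header_not_blank l hh
  rw [stripAGo, if_pos hh, hb]
  rfl

theorem stripAGo_plain (skip : Bool) (l : String) (ls : List String)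
    (hh : (PySem.Str.isIn "Note to Reviewers" l || PySem.Str.isIn "Review terms:" l) = false) :
    stripAGo skip (l :: ls) =
      if skip && (PySem.Str.strip l == "") then stripAGo false ls
      else if !skip then l :: stripAGo skip ls else stripAGo skip ls := by
  rw [stripAGo]
  simp only [hh, Bool.false_eq_true, if_false]

-- A's fold equals 'keep' followed by the accumulator-free loop
theorem stripA_foldl (ls : List String) (keep : List String) (skip : Bool) :
    (ls.foldl stripAStep (keep, skip)).1 = keep ++ stripAGo skip ls := by
  induction ls generalizing keep skip with
  | nil => simp [stripAGo]
  | cons l ls ih =>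
    rw [List.foldl_cons]
    by_cases hh : (PySem.Str.isIn "Note to Reviewers" l || PySem.Str.isIn "Review terms:" l) = true
    · rw [stripAStep_header keep skip l hh, ih, stripAGo_header skip l ls hh]
    · have hh' := Bool.eq_false_iff.mpr hh
      rw [stripAStep_plain keep skip l hh', stripAGo_plain skip l ls hh']
      by_cases hb : (skip && (PySem.Str.strip l == "")) = true
      · rw [if_pos hb, if_pos hb, ih]
      · rw [if_neg hb, if_neg hb]
        cases skip with
        | false =>
          simp only [Bool.not_false]
          rw [if_pos trivial, if_pos trivial, ih]
          simp
        | true =>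
          simp only [Bool.not_true]
          rw [if_neg Bool.false_ne_true, if_neg Bool.false_ne_true, ih]

-- A's flag-carrying loop equals B's walk: skip=false matches the walk, skip=true matches the walk after the inner skip scan
theorem stripAGo_eq (ls : List String) :
    stripAGo false ls = stripAltGo ls ∧ stripAGo true ls = stripAltGo (stripAltSkip ls) := by
  induction ls with
  | nil => constructor <;> simp [stripAGo, stripAltGo, stripAltSkip]
  | cons l ls ih =>
    constructor
    · by_cases hh : (PySem.Str.isIn "Note to Reviewers" l || PySem.Str.isIn "Review terms:" l) = true
      · rw [stripAGo_header false l ls hh, stripAltGo, if_pos hh]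
        exact ih.2
      · have hh' := Bool.eq_false_iff.mpr hh
        rw [stripAGo_plain false l ls hh', stripAltGo, if_neg hh]
        simp only [Bool.false_and, Bool.false_eq_true, if_false, Bool.not_false]
        rw [if_pos trivial]
        exact congrArg (l :: ·) ih.1
    · have hs : stripAGo true (l :: ls) =
            (if (PySem.Str.strip l == "") = true then stripAGo false ls else stripAGo true ls) := by
        by_cases hh : (PySem.Str.isIn "Note to Reviewers" l || PySem.Str.isIn "Review terms:" l) = true
        · rw [stripAGo_header true l ls hh, header_not_blank l hh]
          rw [if_neg Bool.false_ne_true]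
        · have hh' := Bool.eq_false_iff.mpr hh
          rw [stripAGo_plain true l ls hh']
          simp only [Bool.true_and, Bool.not_true]
          by_cases hb : (PySem.Str.strip l == "") = true
          · rw [if_pos hb, if_pos hb]
          · rw [if_neg hb, if_neg hb, if_neg Bool.false_ne_true]
      rw [hs]
      by_cases hb : (PySem.Str.strip l == "") = true
      · rw [if_pos hb, stripAltSkip, if_pos hb]
        exact ih.1
      · rw [if_neg hb, stripAltSkip, if_neg hb]
        exact ih.2

-- ===== VERDICT (by name: the statement is the Claim_ definition above) =====
theorem strip_channel1_spec : Claim_equal_strip_channel1 := by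
  intro raw_text _
  show PySem.Str.join "\n" ((PySem.Str.splitlines raw_text).foldl stripAStep ([], false)).1
      = strip_channel1_alt raw_text
  rw [stripA_foldl _ [] false, List.nil_append, (stripAGo_eq _).1]
  rfl
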